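-- pv_equiv track=rewrite | github.com/neimandavid/traffic-routing | surtrac_test/intersectionGeneratorBlocks.py | makeListListList
-- ===== SOURCE A (Python) =====
-- import itertools
--
-- def makeListListList(listlist):
--     if len(listlist) == 0:
--         return [[]] #TODO Check format here
--     else:
--         listlistlist = []
--         perms = list(itertools.permutations(listlist[0]))
--         if len(listlist) == 1:
--             #Ex:
--             #ll = [[1,2]]
--             #perms = [[1,2],[2,1]]
--             #Just return perms?
--             #Think I'm missing some brackets: return [ [[1,2]], [[2,1]] ]
--             #since I want a list of listlists
--             for perm in perms:
--                 listlistlist.append([list(perm)])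
--         else:
--             #Build stuff recursively. Ex:
--             #ll = [[1,2], [3, 4]]
--             #perms = [[1,2], [2,1]]
--             #Take each thing in perms, and concat all the stuff from ll[1:]
--             #lll = [[[1,2], [3, 4]], [[1,2],[4,3]], [[2,1],[3,4]], [[2,1],[4,3]]]
--             for perm in perms:
--                 for utation in makeListListList(listlist[1:]):
--                     listlistlist.append([list(perm)]+utation)
--         return listlistlist
-- ===== SOURCE B (Python) =====
-- import itertools
--
-- def makeListListList(listlist):
--     perms = [list(itertools.permutations(sub)) for sub in listlist]
--     return [[list(p) for p in combo] for combo in itertools.product(*perms)]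
-- ===== Notes on version B (the rewrite author's own statement) =====
-- stated objective: idiomatic
-- what changed: Replaces the hand-written recursion over listlist[1:] (with a special one-sublist branch) by a single itertools.product over per-sublist permutation lists; the empty and singleton cases fall out of product automatically.
import Mathlib
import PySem

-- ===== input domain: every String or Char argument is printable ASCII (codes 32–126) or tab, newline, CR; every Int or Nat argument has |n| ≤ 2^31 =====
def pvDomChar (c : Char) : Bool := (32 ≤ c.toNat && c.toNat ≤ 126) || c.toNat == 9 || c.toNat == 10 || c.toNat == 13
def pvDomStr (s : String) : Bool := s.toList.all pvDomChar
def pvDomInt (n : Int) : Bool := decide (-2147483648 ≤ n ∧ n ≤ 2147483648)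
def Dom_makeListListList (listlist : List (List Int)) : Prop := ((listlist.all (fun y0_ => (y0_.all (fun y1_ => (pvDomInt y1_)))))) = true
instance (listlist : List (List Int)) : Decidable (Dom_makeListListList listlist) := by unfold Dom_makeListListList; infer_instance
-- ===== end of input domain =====

-- B replaces A's tail recursion with a single Cartesian product over per-sublist permutation lists (idiomatic, same cost).


-- ===== PORT A =====
-- A: recursion over the tail; itertools.permutations(xs) = PySem.List.permutations xs xs.length
def makeListListList : List (List Int) → List (List (List Int))
  | [] => [[]]
  | first :: rest =>
      let perms := PySem.List.permutations first first.length
      if rest = [] then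
        perms.map (fun perm => [perm])
      else
        perms.flatMap (fun perm => (makeListListList rest).map (fun utation => [perm] ++ utation))

-- ===== PORT B =====
-- itertools.product(*argLists): leftmost argument varies slowest
def pyCartProd : List (List (List Int)) → List (List (List Int))
  | [] => [[]]
  | choices :: rest => choices.flatMap (fun c => (pyCartProd rest).map (fun combo => c :: combo))

def makeListListList_alt (listlist : List (List Int)) : List (List (List Int)) :=
  pyCartProd (listlist.map (fun sub => PySem.List.permutations sub sub.length))

-- ===== PRECONDITION & SPEC =====
def Spec_makeListListList (listlist : List (List Int)) (out : List (List (List Int))) : Prop := out = makeListListList_alt listlist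
instance (listlist : List (List Int)) (out : List (List (List Int))) : Decidable (Spec_makeListListList listlist out) := by unfold Spec_makeListListList; infer_instance

-- ===== CLAIM (what is proved, stated in full; the proofs are below) =====
def Claim_equal_makeListListList : Prop := ∀ (listlist : List (List Int)), Dom_makeListListList listlist → Spec_makeListListList listlist (makeListListList listlist)

-- ===== LEMMAS AND PROOFS =====

theorem makeListListList_eq_alt (listlist : List (List Int)) :
    makeListListList listlist = makeListListList_alt listlist := by
  induction listlist with
  | nil => rfl
  | cons first rest ih =>
    by_cases h : rest = []
    · subst h
      simp [makeListListList, makeListListList_alt, pyCartProd, ← List.map_eq_flatMap]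
    · simp only [makeListListList, makeListListList_alt, pyCartProd, if_neg h, List.map_cons, ih]
      rfl

-- ===== VERDICT (by name: the statement is the Claim_ definition above) =====
theorem makeListListList_spec : Claim_equal_makeListListList := by
  intro listlist _
  unfold Spec_makeListListList
  exact makeListListList_eq_alt listlist
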